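-- pv_equiv track=rewrite | github.com/Samueladewole/velocityai | velocity-platform/backend/python/owasp_security/penetration_testing.py | _assess_combined_risk
-- ===== SOURCE A (Python) =====
-- from typing import Dict, List, Optional, Any, Tuple
--
-- def _assess_combined_risk(results: Dict[str, Any]) -> str:
--     """Assess combined risk across all targets"""
--     critical_total = sum(
--         result["findings_by_severity"].get("critical", 0)
--         for result in results.values()
--     )
--
--     if critical_total > 0:
--         return "critical"
--
--     high_total = sum(
--         result["findings_by_severity"].get("high", 0)
--         for result in results.values()
--     )
--
--     if high_total > 5:
--         return "high"
--     elif high_total > 0: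
--         return "medium"
--     else:
--         return "low"
-- ===== SOURCE B (Python) =====
-- def _totals(items):
--     """Divide-and-conquer: (critical_sum, high_sum) over a list of result records."""
--     if not items:
--         return (0, 0)
--     if len(items) == 1:
--         fbs = items[0]["findings_by_severity"]
--         return (fbs.get("critical", 0), fbs.get("high", 0))
--     mid = len(items) // 2
--     c1, h1 = _totals(items[:mid])
--     c2, h2 = _totals(items[mid:])
--     return (c1 + c2, h1 + h2)
--
--
-- def _assess_combined_risk(results):
--     """Assess combined risk across all targets"""
--     crit, high = _totals(list(results.values()))
--     if crit > 0:
--         return "critical"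
--     if high > 5:
--         return "high"
--     if high > 0:
--         return "medium"
--     return "low"
-- ===== Notes on version B (the rewrite author's own statement) =====
-- stated objective: alternative
-- what changed: B computes both severity totals by a divide-and-conquer recursion that splits the record list in halves and merges (critical,high) pairs, then classifies from the pair, instead of A's two separate linear generator-sum scans.
import Mathlib
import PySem

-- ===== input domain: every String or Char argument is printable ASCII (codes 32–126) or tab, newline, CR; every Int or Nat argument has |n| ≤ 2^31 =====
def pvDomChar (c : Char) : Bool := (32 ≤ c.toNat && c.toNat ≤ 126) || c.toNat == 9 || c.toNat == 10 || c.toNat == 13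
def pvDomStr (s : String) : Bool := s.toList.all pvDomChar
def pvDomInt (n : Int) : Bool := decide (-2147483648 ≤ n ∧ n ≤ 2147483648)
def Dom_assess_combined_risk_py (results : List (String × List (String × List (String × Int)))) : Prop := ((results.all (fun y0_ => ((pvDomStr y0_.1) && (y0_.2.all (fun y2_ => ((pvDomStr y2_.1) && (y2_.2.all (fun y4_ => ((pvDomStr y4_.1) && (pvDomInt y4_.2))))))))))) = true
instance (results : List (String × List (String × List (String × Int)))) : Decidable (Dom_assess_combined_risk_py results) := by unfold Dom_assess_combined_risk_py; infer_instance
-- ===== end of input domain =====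

-- B computes the two severity totals by a divide-and-conquer recursion over the record list
-- (splitting in halves, merging (critical, high) pairs) and classifies from the merged pair,
-- instead of A's two separate linear summing scans; alternative decomposition, same asymptotic cost.


-- ===== PORT A =====
-- result["findings_by_severity"] : Pre_ guarantees the key is present (KeyError excluded), so getD [] is exact there.
def pvFbs (r : List (String × List (String × Int))) : PySem.Dict String Int :=
  PySem.Dict.mk ((PySem.Dict.mk r).getD "findings_by_severity" [])

def assess_combined_risk_py (results : List (String × List (String × List (String × Int)))) : String :=
  let critical_total : Int :=
    results.foldl (fun acc p => acc + (pvFbs p.2).getD "critical" 0) 0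
  if critical_total > 0 then "critical"
  else
    let high_total : Int :=
      results.foldl (fun acc p => acc + (pvFbs p.2).getD "high" 0) 0
    if high_total > 5 then "high"
    else if high_total > 0 then "medium"
    else "low"

-- ===== PORT B =====
-- divide-and-conquer totals, as in Source B's _totals
def pvTotals : List (List (String × List (String × Int))) → Int × Int
  | [] => (0, 0)
  | [r] => ((pvFbs r).getD "critical" 0, (pvFbs r).getD "high" 0)
  | r1 :: r2 :: rest =>
      let items := r1 :: r2 :: rest
      let mid := items.length / 2
      let t1 := pvTotals (items.take mid)
      let t2 := pvTotals (items.drop mid)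
      (t1.1 + t2.1, t1.2 + t2.2)
termination_by items => items.length
decreasing_by
  · simp; omega
  · simp; omega

def assess_combined_risk_py_alt (results : List (String × List (String × List (String × Int)))) : String :=
  let t := pvTotals (results.map (·.2))
  if t.1 > 0 then "critical"
  else if t.2 > 5 then "high"
  else if t.2 > 0 then "medium"
  else "low"

-- ===== PRECONDITION & SPEC =====
-- Pre_ excludes inputs where some target record lacks the "findings_by_severity" key: there the
-- Python A (and B alike) raises KeyError and returns no value.
def Pre_assess_combined_risk_py (results : List (String × List (String × List (String × Int)))) : Prop :=
  (results.all (fun p => (PySem.Dict.mk p.2).contains "findings_by_severity")) = true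
instance (results : List (String × List (String × List (String × Int)))) : Decidable (Pre_assess_combined_risk_py results) := by unfold Pre_assess_combined_risk_py; infer_instance

def pvWitness_assess_combined_risk_py : (List (String × List (String × List (String × Int)))) :=
  [("t1", [("findings_by_severity", [("critical", 0), ("high", 2)])]),
   ("t2", [("findings_by_severity", [("high", 1)])])]

def Spec_assess_combined_risk_py (results : List (String × List (String × List (String × Int)))) (out : String) : Prop := out = assess_combined_risk_py_alt results
instance (results : List (String × List (String × List (String × Int)))) (out : String) : Decidable (Spec_assess_combined_risk_py results out) := by unfold Spec_assess_combined_risk_py; infer_instance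

-- ===== CLAIM (what is proved, stated in full; the proofs are below) =====
def Claim_equal_assess_combined_risk_py : Prop := ∀ (results : List (String × List (String × List (String × Int)))), Dom_assess_combined_risk_py results → Pre_assess_combined_risk_py results → Spec_assess_combined_risk_py results (assess_combined_risk_py results)

-- ===== LEMMAS AND PROOFS =====

-- The divide-and-conquer totals equal the two straight sums (addition is associative, and
-- take/drop repartition the list, so the split order does not matter).
theorem pvTotals_eq_sums (items : List (List (String × List (String × Int)))) :
    pvTotals items = ((items.map (fun r => (pvFbs r).getD "critical" 0)).sum,
                      (items.map (fun r => (pvFbs r).getD "high" 0)).sum) := by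
  induction items using pvTotals.induct with
  | case1 => simp [pvTotals]
  | case2 r => simp [pvTotals]
  | case3 r1 r2 rest a b c d =>
    simp only [b, a] at c d
    rw [pvTotals]
    simp only [c, d]
    have h := List.take_append_drop ((r1 :: r2 :: rest).length / 2) (r1 :: r2 :: rest)
    conv_rhs => rw [← h]
    simp

theorem pv_foldl_add_eq_sum (results : List (String × List (String × List (String × Int))))
    (f : (String × List (String × List (String × Int))) → Int) :
    results.foldl (fun acc p => acc + f p) 0 = (results.map f).sum := by
  rw [PySem.List.foldl_add]; simp

-- ===== VERDICT (by name: the statement is the Claim_ definition above) =====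
theorem assess_combined_risk_py_spec : Claim_equal_assess_combined_risk_py := by
  intro results _ _
  unfold Spec_assess_combined_risk_py assess_combined_risk_py assess_combined_risk_py_alt
  rw [pvTotals_eq_sums]
  simp only [pv_foldl_add_eq_sum, List.map_map, Function.comp_def]
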